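-- pv_equiv track=rewrite | github.com/vovakirdan/tableshark | tableshark/main.py | _define_body
-- ===== SOURCE A (Python) =====
-- from typing import Generator, Sized, Iterable, Any, Callable, Literal, Iterator, List, overload, AnyStr
--
-- def _define_body(text: str, structure: Literal['txt', 'xml'] = 'txt') -> str:
--     """
--     Defines the body section of the text.
--
--     Args:
--         text (str): The input text.
--
--     Returns:
--         str: The body section of the text.
--
--     Raises:
--         None.
--     """
--     if structure == 'txt':
--         i = 1
--         split = text.split('\n')
--         find = True
--         while find:
--             if split[i].startswith('+--'):
--                 find = False
--             i += 1
--         return '\n'.join(split[i - 1:])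
--     else:
--         return text
-- ===== SOURCE B (Python) =====
-- def _define_body(text: str, structure: str = 'txt') -> str:
--     if structure != 'txt':
--         return text
--     pos = text.find('\n+--')
--     if pos == -1:
--         return text
--     return text[pos + 1:]
-- ===== Notes on version B (the rewrite author's own statement) =====
-- stated objective: idiomatic
-- what changed: Replaces the split-into-lines plus index-scanning while-loop by a single str.find of the newline-plus-delimiter marker and one slice of the raw string.
-- outside the precondition, e.g. on _define_body('+--', 'txt'): A raises IndexError, B returns '+--'; on _define_body('txt', 'txt'): A raises IndexError, B returns 'txt'
import Mathlib
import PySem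

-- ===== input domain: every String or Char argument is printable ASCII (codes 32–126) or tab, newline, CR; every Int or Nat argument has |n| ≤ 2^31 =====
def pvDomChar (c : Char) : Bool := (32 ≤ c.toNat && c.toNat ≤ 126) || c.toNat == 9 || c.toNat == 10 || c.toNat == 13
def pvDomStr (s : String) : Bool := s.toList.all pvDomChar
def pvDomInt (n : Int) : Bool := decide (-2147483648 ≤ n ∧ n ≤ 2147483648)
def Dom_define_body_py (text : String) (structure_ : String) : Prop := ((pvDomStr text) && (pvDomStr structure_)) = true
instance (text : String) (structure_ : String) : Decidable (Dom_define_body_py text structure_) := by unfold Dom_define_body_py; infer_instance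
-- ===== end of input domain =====

-- B replaces A's split-into-lines + index-scanning while-loop by a single search for the first newline followed by '+--' on the raw
-- string (idiomatic); where A raises IndexError (no such delimiter line, excluded by Pre_), B returns the text unchanged.

-- ===== PORT A =====
-- the 'while find: … i += 1' loop: returns the final value of i, none = IndexError on split[i]
def pvLoopA (split : List String) (i : Nat) (fuel : Nat) : Option Nat :=
  match fuel with
  | 0 => none
  | fuel + 1 =>
    match PySem.List.pyGet? split (i : Int) with
    | none => none
    | some line =>
      if PySem.Str.startswith line "+--" then some (i + 1)
      else pvLoopA split (i + 1) fuel

def define_body_py (text : String) (structure_ : String) : String :=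
  if structure_ == "txt" then
    let split := (PySem.Str.split? text "\n").getD []
    match pvLoopA split 1 split.length with
    | some i => PySem.Str.join "\n" (PySem.List.slice split (some ((i : Int) - 1)) none)
    | none => ""   -- Python raises IndexError here (excluded by Pre_)
  else text

-- ===== PORT B =====
def define_body_py_alt (text : String) (structure_ : String) : String :=
  if structure_ != "txt" then text
  else
    let pos := PySem.Str.find text "\n+--"
    if pos == -1 then text
    else PySem.Str.slice text (some (pos + 1)) none

-- ===== PRECONDITION & SPEC =====
-- Pre_ excludes exactly the inputs where A raises IndexError: structure 'txt' and no line after the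
-- first one starts with '+--' (equivalently, no newline-then-'+--' occurs in the text).
def Pre_define_body_py (text : String) (structure_ : String) : Prop :=
  structure_ = "txt" → PySem.Str.isIn "\n+--" text = true
instance (text : String) (structure_ : String) : Decidable (Pre_define_body_py text structure_) := by
  unfold Pre_define_body_py; infer_instance
def pvWitness_define_body_py : String × String := ("head\n+--table\nrow", "txt")

def Spec_define_body_py (text : String) (structure_ : String) (out : String) : Prop :=
  out = define_body_py_alt text structure_
instance (text : String) (structure_ : String) (out : String) : Decidable (Spec_define_body_py text structure_ out) := by
  unfold Spec_define_body_py; infer_instance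

-- ===== CLAIM (what is proved, stated in full; the proofs are below) =====
def Claim_equal_define_body_py : Prop := ∀ (text : String) (structure_ : String), Dom_define_body_py text structure_ → Pre_define_body_py text structure_ → Spec_define_body_py text structure_ (define_body_py text structure_)


-- ===== LEMMAS AND PROOFS =====

def split1 : List Char → List (List Char)
  | [] => [[]]
  | c :: t => if c = '\n' then [] :: split1 t else (split1 t).modifyHead (c :: ·)

def scanC : List (List Char) → Option (List (List Char))
  | [] => none
  | l :: t => if PySem.Chars.startswith l ['+', '-', '-'] then some (l :: t) else scanC t

def bodyB : List Char → Option (List Char)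
  | [] => none
  | c :: t => if ['\n', '+', '-', '-'].isPrefixOf (c :: t) then some t else bodyB t

theorem split1_ne_nil (cs : List Char) : split1 cs ≠ [] := by
  induction cs with
  | nil => simp [split1]
  | cons c t ih =>
    simp only [split1]
    split_ifs
    · simp
    · cases h : split1 t with
      | nil => exact absurd h ih
      | cons a b => simp

theorem join_split1 (cs : List Char) : PySem.Chars.join ['\n'] (split1 cs) = cs := by
  induction cs with
  | nil => simp [split1, PySem.Chars.join_singleton]
  | cons c t ih =>
    simp only [split1]
    split_ifs with hc
    · subst hc
      cases h : split1 t with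
      | nil => exact absurd h (split1_ne_nil t)
      | cons a b =>
        rw [PySem.Chars.join_cons_cons]
        rw [h] at ih; simp [ih]
    · cases h : split1 t with
      | nil => exact absurd h (split1_ne_nil t)
      | cons a b =>
        rw [h] at ih
        cases b with
        | nil => simp [PySem.Chars.join_singleton] at ih ⊢; simp [ih]
        | cons b1 b2 =>
          simp only [List.modifyHead_cons]
          rw [PySem.Chars.join_cons_cons] at ih ⊢
          simp [← ih]

theorem newline_not_mem_split1 (cs l : List Char) (h : l ∈ split1 cs) : '\n' ∉ l := by
  induction cs generalizing l with
  | nil => simp [split1] at h; simp [h]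
  | cons c t ih =>
    simp only [split1] at h
    by_cases hc : c = '\n'
    · simp only [if_pos hc, List.mem_cons] at h
      rcases h with h | h
      · simp [h]
      · exact ih l h
    · rw [if_neg hc] at h
      cases hs : split1 t with
      | nil => exact absurd hs (split1_ne_nil t)
      | cons a b =>
        rw [hs] at h
        simp only [List.modifyHead_cons, List.mem_cons] at h
        rcases h with h | h
        · subst h
          intro hmem
          rcases List.mem_cons.mp hmem with h' | h'
          · exact hc h'.symm
          · exact ih a (by rw [hs]; exact List.mem_cons_self ..) h'
        · exact ih l (by rw [hs]; exact List.mem_cons_of_mem _ h)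

theorem go_eq (fuel : Nat) : ∀ (l cur : List Char) (acc : List (List Char)), l.length ≤ fuel →
    PySem.Chars.splitOn.go ['\n'] fuel l cur acc = acc.reverse ++ (split1 l).modifyHead (cur.reverse ++ ·) := by
  induction fuel with
  | zero =>
    intro l cur acc h
    have : l = [] := List.length_eq_zero_iff.mp (Nat.le_zero.mp h)
    subst this
    simp [PySem.Chars.splitOn.go, split1]
  | succ fuel ih =>
    intro l cur acc h
    cases l with
    | nil => simp [PySem.Chars.splitOn.go, split1]
    | cons c rest =>
      simp only [PySem.Chars.splitOn.go]
      by_cases hc : c = '\n'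
      · subst hc
        have hpre : List.isPrefixOf ['\n'] ('\n' :: rest) = true := by simp [List.isPrefixOf]
        rw [if_pos hpre]
        rw [show List.drop (['\n'].length) ('\n' :: rest) = rest from rfl, ih rest [] (cur.reverse :: acc) (by simpa using Nat.le_of_succ_le_succ h)]
        cases hs : split1 rest with
        | nil => exact absurd hs (split1_ne_nil rest)
        | cons a b => simp [split1, hs]
      · have hpre : List.isPrefixOf ['\n'] (c :: rest) = false := by
          simp [List.isPrefixOf]; intro h'; exact absurd h'.symm hc
        rw [if_neg (by simp [hpre])]
        rw [ih rest (c :: cur) acc (by simpa using Nat.le_of_succ_le_succ h)]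
        cases hs : split1 rest with
        | nil => exact absurd hs (split1_ne_nil rest)
        | cons a b => simp [split1, hs, if_neg hc]

theorem splitOn_eq_split1 (cs : List Char) : PySem.Chars.splitOn cs ['\n'] = split1 cs := by
  unfold PySem.Chars.splitOn
  rw [go_eq (cs.length + 1) cs [] [] (Nat.le_succ _)]
  cases hs : split1 cs with
  | nil => exact absurd hs (split1_ne_nil cs)
  | cons a b => simp

theorem prefix_firstline (p a u : List Char) (hp : '\n' ∉ p) (_ha : '\n' ∉ a) :
    p <+: a ++ '\n' :: u ↔ p <+: a := by
  constructor
  · intro h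
    by_cases hle : p.length ≤ a.length
    · have h1 : p = (a ++ '\n' :: u).take p.length := (List.prefix_iff_eq_take.mp h)
      rw [List.take_append_of_le_length hle] at h1
      rw [h1]
      exact List.take_prefix _ _
    · have hlt : a.length < p.length := Nat.lt_of_not_le hle
      exfalso
      have hlen : a.length < (a ++ '\n' :: u).length := by simp
      have := h.getElem hlt
      rw [List.getElem_append_right (Nat.le_refl _)] at this
      simp at this
      exact hp (this ▸ List.getElem_mem hlt)
  · intro h
    exact h.trans (List.prefix_append a _)

theorem find_eq_of (cs sub : List Char) (k : Nat) (h1 : sub <+: cs.drop k)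
    (h2 : ∀ i < k, ¬ sub <+: cs.drop i) : PySem.Chars.find cs sub = k := by
  have hin : sub <:+: cs := List.infix_iff_prefix_suffix.mpr ⟨cs.drop k, h1, List.drop_suffix k cs⟩
  have hnn : 0 ≤ PySem.Chars.find cs sub := (PySem.Chars.find_nonneg_iff cs sub).mpr hin
  obtain ⟨hs1, hs2⟩ := PySem.Chars.find_spec hnn
  have hf : (PySem.Chars.find cs sub).toNat = k := by
    rcases Nat.lt_trichotomy (PySem.Chars.find cs sub).toNat k with h | h | h
    · exact absurd hs1 (h2 _ h)
    · exact h
    · exact absurd h1 (hs2 k h)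
  omega

theorem bodyB_eq (cs : List Char) :
    bodyB cs = if 0 ≤ PySem.Chars.find cs ['\n', '+', '-', '-'] then
      some (cs.drop ((PySem.Chars.find cs ['\n', '+', '-', '-']).toNat + 1)) else none := by
  induction cs with
  | nil =>
    rw [if_neg]
    · rfl
    · rw [PySem.Chars.find_nonneg_iff]
      intro h
      simpa using h.sublist.length_le
  | cons c t ih =>
    by_cases hpre : ['\n', '+', '-', '-'] <+: (c :: t)
    · have hf : PySem.Chars.find (c :: t) ['\n', '+', '-', '-'] = (0 : Nat) := by
        apply find_eq_of
        · simpa using hpre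
        · intro i hi; omega
      simp only [bodyB, if_pos (List.isPrefixOf_iff_prefix.mpr hpre)]
      rw [hf]
      norm_num
    · have hbb : bodyB (c :: t) = bodyB t := by
        simp only [bodyB]
        rw [if_neg (by simpa [List.isPrefixOf_iff_prefix] using hpre)]
      by_cases hin : ['\n', '+', '-', '-'] <:+: t
      · have h0 : 0 ≤ PySem.Chars.find t ['\n', '+', '-', '-'] :=
          (PySem.Chars.find_nonneg_iff _ _).mpr hin
        obtain ⟨hs1, hs2⟩ := PySem.Chars.find_spec h0
        set q := (PySem.Chars.find t ['\n', '+', '-', '-']).toNat with hq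
        have hf : PySem.Chars.find (c :: t) ['\n', '+', '-', '-'] = ((q + 1 : Nat) : Int) := by
          apply find_eq_of
          · simpa using hs1
          · intro i hi
            cases i with
            | zero => simpa using hpre
            | succ j => simpa using hs2 j (by omega)
        rw [hbb, ih, if_pos h0, hf, if_pos (by positivity)]
        congr 1
      · have hnin : ¬ ['\n', '+', '-', '-'] <:+: (c :: t) := by
          intro h
          rcases List.infix_cons_iff.mp h with h | h
          · exact hpre h
          · exact hin h
        rw [hbb, ih, if_neg, if_neg]
        · intro h; exact hnin ((PySem.Chars.find_nonneg_iff _ _).mp h)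
        · intro h; exact hin ((PySem.Chars.find_nonneg_iff _ _).mp h)

theorem scan_split1 (cs : List Char) :
    (Option.map (PySem.Chars.join ['\n']) (scanC (split1 cs)) =
      if ['+', '-', '-'] <+: cs then some cs else bodyB cs) ∧
    (Option.map (PySem.Chars.join ['\n']) (scanC ((split1 cs).drop 1)) = bodyB cs) := by
  induction cs with
  | nil =>
    refine ⟨?_, by simp [split1, scanC, bodyB]⟩
    rw [if_neg (by intro h; simpa using h.length_le)]
    have hsw : PySem.Chars.startswith [] ['+', '-', '-'] = false := by decide
    simp [split1, scanC, hsw, bodyB]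
  | cons c t ih =>
    obtain ⟨ih0, ih1⟩ := ih
    have hsub : (['\n', '+', '-', '-'] <+: (c :: t)) ↔ (c = '\n' ∧ ['+', '-', '-'] <+: t) := by
      rw [List.cons_prefix_cons]; tauto
    have hbody : bodyB (c :: t) =
        if c = '\n' then (if ['+', '-', '-'] <+: t then some t else bodyB t) else bodyB t := by
      by_cases hc : c = '\n'
      · subst hc
        by_cases hp : ['+', '-', '-'] <+: t
        · simp only [bodyB, if_pos (List.isPrefixOf_iff_prefix.mpr (hsub.mpr ⟨rfl, hp⟩))]
          simp [hp]
        · simp only [bodyB]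
          rw [if_neg (by simp [List.isPrefixOf_iff_prefix]; intro h; exact absurd h hp)]
          simp [hp]
      · simp only [bodyB]
        rw [if_neg (by simp [List.isPrefixOf_iff_prefix, hsub, hc]), if_neg hc]
    constructor
    · -- A0
      by_cases hc : c = '\n'
      · subst hc
        rw [show split1 ('\n' :: t) = [] :: split1 t from by simp [split1]]
        have h1 : scanC ([] :: split1 t) = scanC (split1 t) := by
          simp [scanC, PySem.Chars.startswith_iff]
        rw [h1, ih0, hbody]
        have hnp : ¬ ['+', '-', '-'] <+: '\n' :: t := by
          rw [List.cons_prefix_cons]; simp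
        simp [hnp]
      · simp only [split1, if_neg hc]
        cases hs : split1 t with
        | nil => exact absurd hs (split1_ne_nil t)
        | cons h tl =>
          have hjoin : PySem.Chars.join ['\n'] ((c :: h) :: tl) = c :: t := by
            cases tl with
            | nil =>
              have := join_split1 t; rw [hs, PySem.Chars.join_singleton] at this
              simp [PySem.Chars.join_singleton, this]
            | cons u0 tl' =>
              have := join_split1 t; rw [hs, PySem.Chars.join_cons_cons] at this
              rw [PySem.Chars.join_cons_cons]
              simp [← this]
          have hcond : PySem.Chars.startswith (c :: h) ['+', '-', '-'] = true ↔
              ['+', '-', '-'] <+: (c :: t) := by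
            rw [PySem.Chars.startswith_iff]
            cases tl with
            | nil =>
              have := join_split1 t; rw [hs, PySem.Chars.join_singleton] at this
              rw [this]
            | cons u0 tl' =>
              have := join_split1 t; rw [hs, PySem.Chars.join_cons_cons] at this
              have ht : c :: t = (c :: h) ++ '\n' :: PySem.Chars.join ['\n'] (u0 :: tl') := by
                simp [← this]
              rw [ht]
              exact (prefix_firstline _ _ _ (by decide)
                (by intro hm
                    rcases List.mem_cons.mp hm with h' | h'
                    · exact hc h'.symm
                    · exact newline_not_mem_split1 t h (hs ▸ List.mem_cons_self ..) h')).symm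
          simp only [List.modifyHead_cons, scanC]
          by_cases hsw : PySem.Chars.startswith (c :: h) ['+', '-', '-'] = true
          · rw [if_pos hsw, if_pos (hcond.mp hsw)]
            simp [hjoin]
          · rw [if_neg hsw, if_neg (by rw [← hcond]; exact hsw)]
            have : scanC tl = scanC ((split1 t).drop 1) := by rw [hs]; rfl
            rw [this, ih1, hbody, if_neg hc]
    · -- A1
      by_cases hc : c = '\n'
      · subst hc
        rw [show split1 ('\n' :: t) = [] :: split1 t from by simp [split1],
          List.drop_one, List.tail_cons, ih0, hbody]
        simp
      · simp only [split1, if_neg hc]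
        have hdrop : ((split1 t).modifyHead (c :: ·)).drop 1 = (split1 t).drop 1 := by
          cases hs : split1 t with
          | nil => rfl
          | cons a b => rfl
        rw [hdrop, ih1, hbody, if_neg hc]

theorem loopA_main (fuel : Nat) : ∀ (L : List (List Char)) (i : Nat), L.length ≤ i + fuel →
    (match pvLoopA (L.map String.ofList) i fuel with
     | some j => PySem.Str.join "\n" (PySem.List.slice (L.map String.ofList) (some ((j : Int) - 1)) none)
     | none => "") =
    (match scanC (L.drop i) with
     | some M => String.ofList (PySem.Chars.join ['\n'] M)
     | none => "") := by
  induction fuel with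
  | zero =>
    intro L i h
    rw [List.drop_eq_nil_of_le (by omega)]
    rfl
  | succ fuel ih =>
    intro L i h
    rw [show pvLoopA (L.map String.ofList) i (fuel + 1) =
      (match PySem.List.pyGet? (L.map String.ofList) (i : Int) with
       | none => none
       | some line => if PySem.Str.startswith line "+--" then some (i + 1)
         else pvLoopA (L.map String.ofList) (i + 1) fuel) from rfl]
    rw [PySem.List.pyGet?_natCast]
    cases hL : L[i]? with
    | none =>
      have hlen : L.length ≤ i := by
        have := List.getElem?_eq_none_iff.mp hL
        simpa using this
      rw [List.drop_eq_nil_of_le hlen]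
      simp [List.getElem?_map, hL]
      rfl
    | some l =>
      have hi : i < L.length := by
        rcases Nat.lt_or_ge i L.length with h' | h'
        · exact h'
        · rw [List.getElem?_eq_none_iff.mpr h'] at hL; cases hL
      have hgl : l = L[i] := by
        have := List.getElem?_eq_getElem hi; rw [hL] at this; exact (Option.some.injEq _ _).mp this.symm |>.symm
      have hmap : (L.map String.ofList)[i]? = some (String.ofList l) := by
        simp [List.getElem?_map, hL]
      rw [hmap]
      have hdrop : L.drop i = l :: L.drop (i + 1) := by
        rw [List.drop_eq_getElem_cons hi, ← hgl]
      have hsw : PySem.Str.startswith (String.ofList l) "+--" =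
          PySem.Chars.startswith l ['+', '-', '-'] := by
        rw [PySem.Str.startswith_eq, String.toList_ofList]
        rfl
      rw [hdrop]
      simp only [scanC, hsw]
      by_cases hb : PySem.Chars.startswith l ['+', '-', '-'] = true
      · rw [if_pos hb, if_pos hb]
        have harith : ((i + 1 : Nat) : Int) - 1 = ((i : Nat) : Int) := by push_cast; ring
        rw [show (match some (i + 1) with
          | some j => PySem.Str.join "\n" (PySem.List.slice (L.map String.ofList) (some ((j : Int) - 1)) none)
          | none => "") = PySem.Str.join "\n" (PySem.List.slice (L.map String.ofList) (some (((i + 1 : Nat) : Int) - 1)) none) from rfl]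
        rw [harith, PySem.List.slice_some_none, PySem.List.clampIdx_natCast]
        have hmin : min i (L.map String.ofList).length = i := by simp; omega
        rw [hmin]
        rw [← List.map_drop]
        unfold PySem.Str.join
        congr 1
        rw [show ("\n" : String).toList = ['\n'] from by decide]
        congr 1
        rw [List.map_map]
        have : (String.toList ∘ String.ofList) = id := by
          funext x; simp
        rw [this, List.map_id, hdrop]
      · rw [if_neg hb, if_neg hb]
        exact ih L (i + 1) (by omega)

theorem pv_main (text structure_ : String)
    (hpre : structure_ = "txt" → PySem.Str.isIn "\n+--" text = true) :
    define_body_py text structure_ = define_body_py_alt text structure_ := by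
  by_cases hs : structure_ = "txt"
  · subst hs
    have hin : PySem.Str.isIn "\n+--" text = true := hpre rfl
    have hsubL : ("\n+--" : String).toList = ['\n', '+', '-', '-'] := by decide
    have hinf : ['\n', '+', '-', '-'] <:+: text.toList := by
      rw [← hsubL]; exact (PySem.Str.isIn_iff_infix _ _).mp hin
    set cs := text.toList with hcs
    have hfind : PySem.Str.find text "\n+--" = PySem.Chars.find cs ['\n', '+', '-', '-'] := by
      rw [PySem.Str.find_eq, hsubL]
    set pos := PySem.Chars.find cs ['\n', '+', '-', '-'] with hpos
    have h0 : 0 ≤ pos := (PySem.Chars.find_nonneg_iff _ _).mpr hinf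
    -- the split list
    have hsplit : (PySem.Str.split? text "\n").getD [] = (split1 cs).map String.ofList := by
      unfold PySem.Str.split? PySem.Chars.split?
      rw [show ("\n" : String).toList = ['\n'] from by decide]
      rw [if_neg (by decide)]
      simp [splitOn_eq_split1]
      rfl
    -- A's value
    have hA : define_body_py text "txt" =
        (match scanC ((split1 cs).drop 1) with
         | some M => String.ofList (PySem.Chars.join ['\n'] M)
         | none => "") := by
      unfold define_body_py
      rw [if_pos (by simp)]
      simp only [hsplit]
      rw [show ((split1 cs).map String.ofList).length = (split1 cs).length from by simp]
      exact loopA_main (split1 cs).length (split1 cs) 1 (by omega)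
    -- scan gives bodyB
    have hscan := (scan_split1 cs).2
    rw [bodyB_eq, if_pos h0, ← hpos] at hscan
    obtain ⟨M, hM, hMj⟩ : ∃ M, scanC ((split1 cs).drop 1) = some M ∧
        PySem.Chars.join ['\n'] M = cs.drop (pos.toNat + 1) := by
      cases hsc : scanC ((split1 cs).drop 1) with
      | none => rw [hsc] at hscan; cases hscan
      | some M =>
        rw [hsc] at hscan
        exact ⟨M, rfl, by simpa using hscan⟩
    rw [hA, hM]
    -- B's value
    have hne : (PySem.Str.find text "\n+--" == -1) = false := by
      rw [hfind]; simp; omega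
    have hB : define_body_py_alt text "txt" =
        if (PySem.Str.find text "\n+--" == -1) = true then text
        else PySem.Str.slice text (some (PySem.Str.find text "\n+--" + 1)) none := by
      unfold define_body_py_alt
      rw [if_neg (by simp)]
    rw [hB, hne]
    simp only [Bool.false_eq_true, if_false]
    -- both sides via toList
    apply String.toList_inj.mp
    rw [String.toList_ofList, hMj, PySem.Str.toList_slice, PySem.Chars.slice_eq_listSlice,
      PySem.List.slice_some_none]
    have hcast : pos + 1 = ((pos.toNat + 1 : Nat) : Int) := by omega
    rw [hfind, hcast, PySem.List.clampIdx_natCast]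
    have hlen : pos.toNat + 1 ≤ cs.length := by
      obtain ⟨hs1, -⟩ := PySem.Chars.find_spec h0
      have := hs1.length_le
      simp at this
      omega
    rw [Nat.min_eq_left hlen]
  · have hA : (structure_ == "txt") = false := by simp [hs]
    unfold define_body_py define_body_py_alt
    rw [hA, show (structure_ != "txt") = true from by simp [hs]]
    simp

-- ===== VERDICT (by name: the statement is the Claim_ definition above) =====
theorem define_body_py_spec : Claim_equal_define_body_py := by
  intro text structure_ _ hpre
  unfold Spec_define_body_py
  exact pv_main text structure_ hpre
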